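-- pv_equiv track=rewrite | github.com/foreverxujiahuan/algorithm | 竞赛/A122/B.py | canSortArray
-- ===== SOURCE A (Python) =====
-- from typing import List
--
-- def canSortArray(nums: List[int]) -> bool:
--     sub_nums = []
--     length = len(nums)
--     cur_sub = [nums[0]]
--     cur_cnt = bin(nums[0]).count('1')
--     for i in range(1, length):
--         if bin(nums[i]).count('1') == cur_cnt:
--             cur_sub.append(nums[i])
--         else:
--             sub_nums.append(cur_sub)
--             cur_cnt = bin(nums[i]).count('1')
--             cur_sub = [nums[i]]
--     if cur_sub:
--         sub_nums.append(cur_sub)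
--     tmp_nums = []
--     for sub in sub_nums:
--         tmp_nums.extend(sorted(sub))
--     if tmp_nums == sorted(nums):
--         return True
--     return False
-- ===== SOURCE B (Python) =====
-- def canSortArray(nums):
--     # One pass: group boundaries occur where the popcount changes; the array is
--     # sortable by the allowed swaps iff every element is >= the max of all
--     # elements in earlier (finished) groups.
--     bound_max = None   # max of all elements before the current group
--     run_max = None     # max of all elements seen so far
--     cur_cnt = None     # popcount of the current group
--     for x in nums:
--         c = bin(x).count('1')
--         if c != cur_cnt:
--             bound_max = run_max
--             cur_cnt = c
--         if bound_max is not None and x < bound_max: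
--             return False
--         if run_max is None or x > run_max:
--             run_max = x
--     return True
-- ===== Notes on version B (the rewrite author's own statement) =====
-- stated objective: faster
-- what changed: Instead of splitting into popcount groups, sorting every group plus the whole array and comparing lists, B makes a single pass keeping the max of all finished groups and fails as soon as an element is smaller than it.
import Mathlib
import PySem

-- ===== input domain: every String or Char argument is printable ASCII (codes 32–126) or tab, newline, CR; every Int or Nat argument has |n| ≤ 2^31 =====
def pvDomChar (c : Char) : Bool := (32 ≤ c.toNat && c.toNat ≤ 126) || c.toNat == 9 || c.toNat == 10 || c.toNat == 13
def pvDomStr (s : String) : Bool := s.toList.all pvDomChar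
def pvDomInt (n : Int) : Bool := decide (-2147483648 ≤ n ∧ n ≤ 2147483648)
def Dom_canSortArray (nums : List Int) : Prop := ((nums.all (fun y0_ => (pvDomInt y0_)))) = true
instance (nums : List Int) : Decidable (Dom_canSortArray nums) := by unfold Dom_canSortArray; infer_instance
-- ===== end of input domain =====

-- B replaces A's group-sort-and-compare check by a single pass that tracks the max of all
-- finished popcount groups and rejects as soon as an element is below it (measured faster).


-- ===== PORT A =====
-- bin(n).count('1') is the popcount of |n|, i.e. PySem.Int.bitCount (Python-exact on negatives)
def canSortArray (nums : List Int) : Bool :=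
  let length : Int := nums.length
  let x0 := PySem.List.pyGetD nums 0 0      -- nums[0]; IndexError on [] is excluded by Pre_
  let st := (PySem.List.pyRange 1 length 1).foldl
      (fun (st : List (List Int) × List Int × Nat) i =>
        let x := PySem.List.pyGetD nums i 0
        if PySem.Int.bitCount x = st.2.2 then
          (st.1, st.2.1 ++ [x], st.2.2)
        else
          (st.1 ++ [st.2.1], [x], PySem.Int.bitCount x))
      (([] : List (List Int)), [x0], PySem.Int.bitCount x0)
  let sub_nums := if st.2.1 ≠ [] then st.1 ++ [st.2.1] else st.1
  let tmp_nums := sub_nums.foldl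
      (fun acc sub => acc ++ PySem.List.sorted sub (fun y => y) false) []
  if tmp_nums = PySem.List.sorted nums (fun y => y) false then true else false

-- ===== PORT B =====
def altLoop : List Int → Option Int → Option Int → Option Nat → Bool
  | [], _, _, _ => true
  | x :: rest, boundMax, runMax, curCnt =>
    let c := PySem.Int.bitCount x
    let st := if some c ≠ curCnt then (runMax, some c) else (boundMax, curCnt)
    if st.1.elim false (fun m => decide (x < m)) then false
    else altLoop rest st.1 (some (runMax.elim x (fun m => if x > m then x else m))) st.2

def canSortArray_alt (nums : List Int) : Bool :=
  altLoop nums none none none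

-- ===== PRECONDITION & SPEC =====
-- Pre_ excludes only the empty list, on which A raises IndexError (nums[0]).
def Pre_canSortArray (nums : List Int) : Prop := nums ≠ []
instance (nums : List Int) : Decidable (Pre_canSortArray nums) := by unfold Pre_canSortArray; infer_instance
def pvWitness_canSortArray : List Int := [3, 5, 4]

def Spec_canSortArray (nums : List Int) (out : Bool) : Prop := out = canSortArray_alt nums
instance (nums : List Int) (out : Bool) : Decidable (Spec_canSortArray nums out) := by unfold Spec_canSortArray; infer_instance

-- ===== CLAIM (what is proved, stated in full; the proofs are below) =====
def Claim_equal_canSortArray : Prop := ∀ (nums : List Int), Dom_canSortArray nums → Pre_canSortArray nums → Spec_canSortArray nums (canSortArray nums)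

-- ===== LEMMAS AND PROOFS =====

-- the run decomposition both loops perform, made explicit (proof-side only)
def splitA : List Int → List Int → Nat → List (List Int)
  | [], cur, _ => [cur]
  | x :: rest, cur, cnt =>
    if PySem.Int.bitCount x = cnt then splitA rest (cur ++ [x]) cnt
    else cur :: splitA rest [x] (PySem.Int.bitCount x)

def geOpt : Option Int → Int → Bool
  | none, _ => true
  | some m, x => decide (m ≤ x)

def fmax (bm : Option Int) (r : List Int) : Option Int :=
  r.foldl (fun a x => some (a.elim x (fun m => if x > m then x else m))) bm

def runsOK : Option Int → List (List Int) → Bool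
  | _, [] => true
  | bm, r :: rs => r.all (geOpt bm) && runsOK (fmax bm r) rs

-- the pairwise between-run condition
def Q (rs : List (List Int)) : Prop :=
  rs.Pairwise (fun r s => ∀ x ∈ r, ∀ y ∈ s, x ≤ y)

theorem splitA_head (rest cur : List Int) (cnt : Nat) :
    ∃ t rs, splitA rest cur cnt = (cur ++ t) :: rs := by
  induction rest generalizing cur cnt with
  | nil => exact ⟨[], [], by simp [splitA]⟩
  | cons x rest ih =>
    by_cases h : PySem.Int.bitCount x = cnt
    · obtain ⟨t, rs, ht⟩ := ih (cur ++ [x]) cnt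
      exact ⟨x :: t, rs, by simp [splitA, h, ht]⟩
    · exact ⟨[], splitA rest [x] (PySem.Int.bitCount x), by simp [splitA, h]⟩

theorem splitA_flatten (rest cur : List Int) (cnt : Nat) :
    (splitA rest cur cnt).flatten = cur ++ rest := by
  induction rest generalizing cur cnt with
  | nil => simp [splitA]
  | cons x rest ih =>
    by_cases h : PySem.Int.bitCount x = cnt <;> simp [splitA, h, ih]

-- A's fold produces exactly the splitA decomposition
theorem foldA_eq (rest : List Int) (subs : List (List Int)) (cur : List Int) (cnt : Nat)
    (hcur : cur ≠ []) :
    (let st := rest.foldl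
        (fun (st : List (List Int) × List Int × Nat) x =>
          if PySem.Int.bitCount x = st.2.2 then (st.1, st.2.1 ++ [x], st.2.2)
          else (st.1 ++ [st.2.1], [x], PySem.Int.bitCount x)) (subs, cur, cnt);
      if st.2.1 ≠ [] then st.1 ++ [st.2.1] else st.1) = subs ++ splitA rest cur cnt := by
  induction rest generalizing subs cur cnt with
  | nil => simp [splitA, hcur]
  | cons x rest ih =>
    by_cases h : PySem.Int.bitCount x = cnt
    · simpa [splitA, h] using ih subs (cur ++ [x]) cnt (by simp)
    · simpa [splitA, h, List.append_assoc] using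
        ih (subs ++ [cur]) [x] (PySem.Int.bitCount x) (by simp)

theorem fmax_append (bm : Option Int) (r : List Int) (x : Int) :
    fmax bm (r ++ [x]) = some ((fmax bm r).elim x (fun m => if x > m then x else m)) := by
  simp [fmax]

theorem elim_lt_eq_not_geOpt (o : Option Int) (x : Int) :
    (o.elim false (fun m => decide (x < m))) = !(geOpt o x) := by
  cases o with
  | none => simp [geOpt]
  | some m =>
    by_cases h : x < m
    · simp [geOpt, h, not_le.mpr h]
    · simp [geOpt, h, not_lt.mp h]

theorem all_false_of_mem {l : List Int} {p : Int → Bool} {x : Int}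
    (hx : x ∈ l) (hp : p x = false) : l.all p = false := by
  cases h : l.all p with
  | false => rfl
  | true => exact absurd (List.all_eq_true.mp h x hx) (by simp [hp])

-- B's loop computes runsOK over the splitA decomposition
theorem altLoop_eq (rest : List Int) (cur : List Int) (cnt : Nat) (bm : Option Int)
    (hcur : ∀ y ∈ cur, geOpt bm y = true) :
    altLoop rest bm (fmax bm cur) (some cnt) = runsOK bm (splitA rest cur cnt) := by
  induction rest generalizing cur cnt bm with
  | nil => simp [altLoop, splitA, runsOK, List.all_eq_true.mpr hcur]
  | cons x rest ih =>
    by_cases h : PySem.Int.bitCount x = cnt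
    · -- same run
      by_cases hx : geOpt bm x = true
      · have step : altLoop (x :: rest) bm (fmax bm cur) (some cnt)
            = altLoop rest bm (fmax bm (cur ++ [x])) (some cnt) := by
          simp [altLoop, h, elim_lt_eq_not_geOpt, hx, fmax_append]
        rw [step, ih (cur ++ [x]) cnt bm (by
          intro y hy; rcases List.mem_append.mp hy with hy | hy
          · exact hcur y hy
          · simp at hy; subst hy; exact hx)]
        simp [splitA, h]
      · have hx' : geOpt bm x = false := by revert hx; cases geOpt bm x <;> simp
        have lhs : altLoop (x :: rest) bm (fmax bm cur) (some cnt) = false := by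
          simp [altLoop, h, elim_lt_eq_not_geOpt, hx']
        obtain ⟨t, rs', ht⟩ := splitA_head rest (cur ++ [x]) cnt
        have rhs : runsOK bm (splitA (x :: rest) cur cnt) = false := by
          rw [show splitA (x :: rest) cur cnt = splitA rest (cur ++ [x]) cnt from by
            simp [splitA, h], ht]
          simp only [runsOK]
          rw [all_false_of_mem (x := x) (by simp) hx']
          simp
        rw [lhs, rhs]
    · -- boundary: new bound is fmax bm cur
      by_cases hx : geOpt (fmax bm cur) x = true
      · have hc : ((fmax bm cur).elim false (fun m => decide (x < m))) = false := by
          rw [elim_lt_eq_not_geOpt, hx]; rfl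
        have step : altLoop (x :: rest) bm (fmax bm cur) (some cnt)
            = altLoop rest (fmax bm cur) (fmax (fmax bm cur) [x])
                (some (PySem.Int.bitCount x)) := by
          simp only [altLoop, ne_eq, Option.some.injEq, h, not_false_iff, if_true, hc,
            Bool.false_eq_true, if_false]
          simp [fmax]
        rw [step, ih [x] (PySem.Int.bitCount x) (fmax bm cur) (by
          intro y hy; simp at hy; subst hy; exact hx)]
        simp [splitA, h, runsOK, List.all_eq_true.mpr hcur]
      · have hx' : geOpt (fmax bm cur) x = false := by revert hx; cases geOpt (fmax bm cur) x <;> simp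
        have lhs : altLoop (x :: rest) bm (fmax bm cur) (some cnt) = false := by
          simp [altLoop, h, elim_lt_eq_not_geOpt, hx']
        obtain ⟨t, rs', ht⟩ := splitA_head rest [x] (PySem.Int.bitCount x)
        have rhs : runsOK bm (splitA (x :: rest) cur cnt) = false := by
          rw [show splitA (x :: rest) cur cnt
              = cur :: splitA rest [x] (PySem.Int.bitCount x) from by simp [splitA, h], ht]
          simp only [runsOK]
          rw [all_false_of_mem (x := x) (by simp) hx']
          simp
        rw [lhs, rhs]

theorem geOpt_fmax (r : List Int) (bm : Option Int) (x : Int) :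
    geOpt (fmax bm r) x = (geOpt bm x && r.all (fun a => decide (a ≤ x))) := by
  induction r generalizing bm with
  | nil => simp [fmax]
  | cons a r ih =>
    have : fmax bm (a :: r) = fmax (some (bm.elim a (fun m => if a > m then a else m))) r := by
      simp [fmax]
    rw [this, ih]
    cases bm with
    | none => simp [geOpt]
    | some m =>
      by_cases h : a > m <;> by_cases h2 : m ≤ x <;> by_cases h3 : a ≤ x <;>
        simp [geOpt, h, h2, h3] <;> omega

theorem runsOK_iff (rs : List (List Int)) (bm : Option Int) :
    runsOK bm rs = true ↔ (∀ x ∈ rs.flatten, geOpt bm x = true) ∧ Q rs := by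
  induction rs generalizing bm with
  | nil => simp [runsOK, Q]
  | cons r rs ih =>
    constructor
    · intro hr
      have h' : (r.all (geOpt bm) && runsOK (fmax bm r) rs) = true := hr
      have ha : r.all (geOpt bm) = true := Bool.and_elim_left h'
      have hrec : runsOK (fmax bm r) rs = true := Bool.and_elim_right h' 
      obtain ⟨h2, h3⟩ := (ih (fmax bm r)).mp hrec
      constructor
      · intro x hx
        rw [List.flatten_cons, List.mem_append] at hx
        rcases hx with hx | hx
        · exact List.all_eq_true.mp ha x hx
        · have hh := h2 x hx; rw [geOpt_fmax] at hh
          exact Bool.and_elim_left hh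
      · refine List.Pairwise.cons ?_ h3
        intro s hs x hxr y hy
        have hh := h2 y (List.mem_flatten.mpr ⟨s, hs, hy⟩)
        rw [geOpt_fmax] at hh
        exact of_decide_eq_true (List.all_eq_true.mp (Bool.and_elim_right hh) x hxr)
    · rintro ⟨h1, hq⟩
      have hq1 : ∀ s ∈ rs, ∀ x ∈ r, ∀ y ∈ s, x ≤ y := (List.pairwise_cons.mp hq).1
      have hq2 : Q rs := (List.pairwise_cons.mp hq).2
      have ha : r.all (geOpt bm) = true :=
        List.all_eq_true.mpr (fun x hx => h1 x (by simp [hx]))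
      have hrec : runsOK (fmax bm r) rs = true := by
        refine (ih (fmax bm r)).mpr ⟨?_, hq2⟩
        intro x hx
        rw [geOpt_fmax]
        refine Bool.and_eq_true_iff.mpr ⟨h1 x (by simp; right; simpa using hx), ?_⟩
        refine List.all_eq_true.mpr (fun a ha' => decide_eq_true ?_)
        obtain ⟨s, hs, hxs⟩ := List.mem_flatten.mp hx
        exact hq1 s hs a ha' x hxs
      simp [runsOK, ha, hrec]

-- concatenating the sorted runs is a permutation of the concatenation
theorem flatMap_sorted_perm (rs : List (List Int)) :
    (rs.flatMap (fun r => PySem.List.sorted r (fun y => y) false)).Perm rs.flatten := by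
  induction rs with
  | nil => simp
  | cons r rs ih =>
    simpa using List.Perm.append (PySem.List.sorted_perm r (fun y => y) false) ih

-- the heart: A's sorted-concat comparison equals B's chain condition
theorem key_iff (rs : List (List Int)) :
    (rs.flatMap (fun r => PySem.List.sorted r (fun y => y) false)
       = PySem.List.sorted rs.flatten (fun y => y) false)
    ↔ runsOK none rs = true := by
  rw [runsOK_iff]
  have hperm := flatMap_sorted_perm rs
  constructor
  · intro h
    refine ⟨by intro x _; simp [geOpt], ?_⟩
    have hpw : (rs.flatMap (fun r => PySem.List.sorted r (fun y => y) false)).Pairwise (· ≤ ·) := by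
      rw [h]
      simpa using PySem.List.sorted_pairwise rs.flatten (fun y => y)
    rw [List.flatMap_def, List.pairwise_flatten] at hpw
    have hbetween := hpw.2
    rw [List.pairwise_map] at hbetween
    refine hbetween.imp ?_
    intro r s hle x hx y hy
    exact hle x ((PySem.List.mem_sorted _ _ _ _).mpr hx) y ((PySem.List.mem_sorted _ _ _ _).mpr hy)
  · rintro ⟨-, hq⟩
    have hpw : (rs.flatMap (fun r => PySem.List.sorted r (fun y => y) false)).Pairwise (· ≤ ·) := by
      rw [List.flatMap_def, List.pairwise_flatten]
      constructor
      · intro l hl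
        obtain ⟨r, hr, rfl⟩ := List.mem_map.mp hl
        simpa using PySem.List.sorted_pairwise r (fun y => y)
      · rw [List.pairwise_map]
        refine hq.imp ?_
        intro r s hle x hx y hy
        exact hle x ((PySem.List.mem_sorted _ _ _ _).mp hx) y ((PySem.List.mem_sorted _ _ _ _).mp hy)
    exact (PySem.List.sorted_id_eq_of_perm_of_pairwise rs.flatten _ hperm hpw).symm

-- ===== VERDICT (by name: the statement is the Claim_ definition above) =====
theorem canSortArray_spec : Claim_equal_canSortArray := by
  intro nums _ hpre
  unfold Spec_canSortArray
  obtain ⟨x0, rest, rfl⟩ : ∃ x0 rest, nums = x0 :: rest := by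
    cases nums with
    | nil => exact absurd rfl hpre
    | cons a l => exact ⟨a, l, rfl⟩
  have hA : canSortArray (x0 :: rest)
      = (if (splitA rest [x0] (PySem.Int.bitCount x0)).flatMap
            (fun r => PySem.List.sorted r (fun y => y) false)
          = PySem.List.sorted (x0 :: rest) (fun y => y) false then true else false) := by
    simp only [canSortArray, PySem.List.pyGetD_zero_cons]
    rw [PySem.List.foldl_pyRange_pyGetD' (x0 :: rest) 0
      (fun (st : List (List Int) × List Int × Nat) x =>
        if PySem.Int.bitCount x = st.2.2 then (st.1, st.2.1 ++ [x], st.2.2)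
        else (st.1 ++ [st.2.1], [x], PySem.Int.bitCount x))
      (([] : List (List Int)), [x0], PySem.Int.bitCount x0)
      (by norm_num : (0:Int) ≤ 1)]
    simp only [Int.toNat_one, List.drop_one, List.tail_cons]
    rw [foldA_eq rest [] [x0] (PySem.Int.bitCount x0) (by simp)]
    rw [PySem.List.foldl_append_eq_flatMap]
    simp
  have hB : canSortArray_alt (x0 :: rest)
      = runsOK none (splitA rest [x0] (PySem.Int.bitCount x0)) := by
    have h0 : canSortArray_alt (x0 :: rest)
        = altLoop rest none (fmax none [x0]) (some (PySem.Int.bitCount x0)) := by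
      simp [canSortArray_alt, altLoop, fmax]
    rw [h0, altLoop_eq rest [x0] (PySem.Int.bitCount x0) none (by intro y _; simp [geOpt])]
  rw [hA, hB]
  have hfl : (splitA rest [x0] (PySem.Int.bitCount x0)).flatten = x0 :: rest := by
    simpa using splitA_flatten rest [x0] (PySem.Int.bitCount x0)
  have hkey := key_iff (splitA rest [x0] (PySem.Int.bitCount x0))
  rw [hfl] at hkey
  cases hr : runsOK none (splitA rest [x0] (PySem.Int.bitCount x0)) with
  | true => rw [if_pos (hkey.mpr hr)]
  | false =>
    rw [if_neg (fun hcontra => by simp [hkey.mp hcontra] at hr)]
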